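-- pv_equiv track=rewrite | github.com/marcus67/python_base_app | python_base_app/tools.py | anonymize_args
-- ===== SOURCE A (Python) =====
-- PASSWORD_PATTERNS = ("PASSW", "KENNW", "ACCESS", "SECRET")
--
-- PROTECTED_PASSWORD_VALUE = "[HID" "DEN]"  # trick Codacy
--
-- def is_protected_name(p_name):
--     for pattern in PASSWORD_PATTERNS:
--         if pattern in p_name.upper():
--             return True
--
--     return False
--
-- def anonymize_args(p_args):
--     new_args = []
--     hide = False
--
--     for arg in p_args:
--         if is_protected_name(arg):
--             new_args.append(arg)
--             hide = True
--         elif hide: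
--             new_args.append(PROTECTED_PASSWORD_VALUE)
--             hide = False
--         else:
--             new_args.append(arg)
--
--     return new_args
-- ===== SOURCE B (Python) =====
-- PASSWORD_PATTERNS = ("PASSW", "KENNW", "ACCESS", "SECRET")
--
-- PROTECTED_PASSWORD_VALUE = "[HID" "DEN]"  # trick Codacy
--
-- def is_protected_name(p_name):
--     for pattern in PASSWORD_PATTERNS:
--         if pattern in p_name.upper():
--             return True
--     return False
--
-- def anonymize_args(p_args):
--     args = list(p_args)
--     prot = [is_protected_name(a) for a in args]
--     return [PROTECTED_PASSWORD_VALUE if i > 0 and prot[i - 1] and not prot[i] else args[i]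
--             for i in range(len(args))]
-- ===== Notes on version B (the rewrite author's own statement) =====
-- stated objective: alternative
-- what changed: Replaces the carried `hide` state flag with a precomputed boolean table of protected-name flags and a stateless index map that looks back at the previous element's flag.
import Mathlib
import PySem

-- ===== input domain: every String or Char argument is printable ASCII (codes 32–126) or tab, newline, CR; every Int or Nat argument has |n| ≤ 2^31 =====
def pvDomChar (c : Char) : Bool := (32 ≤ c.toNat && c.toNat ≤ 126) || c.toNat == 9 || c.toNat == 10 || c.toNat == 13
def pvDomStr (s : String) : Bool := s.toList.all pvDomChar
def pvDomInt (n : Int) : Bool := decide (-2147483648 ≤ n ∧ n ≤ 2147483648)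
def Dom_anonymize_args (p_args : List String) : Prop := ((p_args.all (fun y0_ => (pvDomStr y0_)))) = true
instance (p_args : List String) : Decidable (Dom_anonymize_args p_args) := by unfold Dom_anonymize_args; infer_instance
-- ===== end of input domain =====

-- B replaces A's running `hide` flag with a precomputed protected-flag table and a
-- stateless index map looking back one position (objective: alternative decomposition).

-- ===== PORT A =====
def PASSWORD_PATTERNS : List String := ["PASSW", "KENNW", "ACCESS", "SECRET"]

def PROTECTED_PASSWORD_VALUE : String := "[HIDDEN]"

def is_protected_name (p_name : String) : Bool :=
  PASSWORD_PATTERNS.any (fun pattern => PySem.Str.isIn pattern (PySem.Str.upper p_name))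

def anonymize_args (p_args : List String) : List String :=
  (p_args.foldl
    (fun (st : List String × Bool) arg =>
      if is_protected_name arg then (st.1 ++ [arg], true)
      else if st.2 then (st.1 ++ [PROTECTED_PASSWORD_VALUE], false)
      else (st.1 ++ [arg], st.2))
    ([], false)).1

-- ===== PORT B =====
def anonymize_args_alt (p_args : List String) : List String :=
  let args := p_args
  let prot := args.map is_protected_name
  (List.range args.length).map (fun i =>
    if decide (0 < i) && prot.getD (i - 1) false && !(prot.getD i false) then
      PROTECTED_PASSWORD_VALUE
    else args.getD i "")

-- ===== PRECONDITION & SPEC =====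
def Spec_anonymize_args (p_args : List String) (out : List String) : Prop := out = anonymize_args_alt p_args
instance (p_args : List String) (out : List String) : Decidable (Spec_anonymize_args p_args out) := by unfold Spec_anonymize_args; infer_instance

-- ===== CLAIM (what is proved, stated in full; the proofs are below) =====
def Claim_equal_anonymize_args : Prop := ∀ (p_args : List String), Dom_anonymize_args p_args → Spec_anonymize_args p_args (anonymize_args p_args)

-- ===== LEMMAS AND PROOFS =====

-- the common value both programs compute: output with an explicit previous-flag parameter
def pvGo (prev : Bool) : List String → List String
  | [] => []
  | a :: t =>
      (if prev && !is_protected_name a then PROTECTED_PASSWORD_VALUE else a) :: pvGo (is_protected_name a) t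

-- B with the previous-element flag made a parameter
def pvH (prev : Bool) (args : List String) : List String :=
  (List.range args.length).map (fun i =>
    if (prev :: args.map is_protected_name).getD i false
        && !((args.map is_protected_name).getD i false) then
      PROTECTED_PASSWORD_VALUE
    else args.getD i "")

theorem pvA_foldl (l : List String) (acc : List String) (hide : Bool) :
    (l.foldl
      (fun (st : List String × Bool) arg =>
        if is_protected_name arg then (st.1 ++ [arg], true)
        else if st.2 then (st.1 ++ [PROTECTED_PASSWORD_VALUE], false)
        else (st.1 ++ [arg], st.2))
      (acc, hide)).1 = acc ++ pvGo hide l := by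
  induction l generalizing acc hide with
  | nil => simp [pvGo]
  | cons a t ih =>
      by_cases hp : is_protected_name a = true
      · simp [List.foldl_cons, hp, ih, pvGo]
      · simp only [Bool.not_eq_true] at hp
        cases hide <;> simp [List.foldl_cons, hp, ih, pvGo]

theorem pvH_cons (prev : Bool) (a : String) (t : List String) :
    pvH prev (a :: t)
      = (if prev && !is_protected_name a then PROTECTED_PASSWORD_VALUE else a) :: pvH (is_protected_name a) t := by
  unfold pvH
  simp [List.length_cons, List.range_succ_eq_map, List.map_map, Function.comp]

theorem pvH_eq_pvGo (prev : Bool) (l : List String) : pvH prev l = pvGo prev l := by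
  induction l generalizing prev with
  | nil => simp [pvH, pvGo]
  | cons a t ih => rw [pvH_cons, pvGo, ih]

theorem pvB_eq_pvH (p_args : List String) : anonymize_args_alt p_args = pvH false p_args := by
  unfold anonymize_args_alt pvH
  apply List.map_congr_left
  intro i hi
  cases i with
  | zero => simp
  | succ n => simp

-- ===== VERDICT (by name: the statement is the Claim_ definition above) =====
theorem anonymize_args_spec : Claim_equal_anonymize_args := by
  intro p_args _
  unfold Spec_anonymize_args
  rw [pvB_eq_pvH, pvH_eq_pvGo]
  unfold anonymize_args
  rw [pvA_foldl]
  simp
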